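-- pv_equiv track=rewrite | github.com/PROADI-TIAF/Fast-Analyzr-BE | Validation/Simulated_conditions/ABE-F/ABE-F.py | parse_tag
-- ===== SOURCE A (Python) =====
-- def parse_tag(tag):
--     subs = {}
--     i = 0
--     while i < len(tag):
--         if tag[i] in "ACGT":
--             j = i + 1
--             while j < len(tag) and tag[j].isdigit():
--                 j += 1
--             if j > i + 1:
--                 subs[int(tag[i + 1:j])] = tag[i]
--             i = j
--         else:
--             i += 1
--     return subs
-- ===== SOURCE B (Python) =====
-- def _record(subs, run, base):
--     if run and base in ("A", "C", "G", "T"):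
--         subs[int(run)] = base
--
--
-- def parse_tag(tag):
--     subs = {}
--     run = ""
--     base = ""
--     for ch in tag:
--         if ch.isdigit():
--             run += ch
--         else:
--             _record(subs, run, base)
--             run = ""
--             base = ch
--     _record(subs, run, base)
--     return subs
-- ===== Notes on version B (the rewrite author's own statement) =====
-- stated objective: simpler
-- what changed: A's index-based while loop with an inner digit-lookahead while and slice is replaced by a single for-loop over the characters that accumulates the current digit run and the last non-digit character (the candidate base), recording an entry each time a run ends.
import Mathlib
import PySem

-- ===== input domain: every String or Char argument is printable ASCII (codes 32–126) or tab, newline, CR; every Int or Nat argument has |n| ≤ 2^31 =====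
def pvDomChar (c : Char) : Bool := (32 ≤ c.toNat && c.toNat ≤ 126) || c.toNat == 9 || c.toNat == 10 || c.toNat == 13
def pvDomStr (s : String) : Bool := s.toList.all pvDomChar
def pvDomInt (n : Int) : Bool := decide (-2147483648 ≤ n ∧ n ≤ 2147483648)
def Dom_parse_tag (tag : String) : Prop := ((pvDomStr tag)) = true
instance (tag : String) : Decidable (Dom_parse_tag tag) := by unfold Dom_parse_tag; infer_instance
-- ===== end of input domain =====

-- B replaces A's index-based while loop with digit lookahead by a single for-loop that
-- accumulates the current digit run and its preceding base character (objective: simpler).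

-- int(<digit run>): shared by both ports (both Pythons call int() on the run string)
def pyIntRun (l : List Char) : Int := (PySem.Int.ofChars? l).getD 0

-- ===== PORT A =====
-- inner while: 'while j < len(tag) and tag[j].isdigit(): j += 1'
def aDigits (cs : List Char) (j : Nat) : Nat :=
  if h : j < cs.length then
    if PySem.Chars.isdigit cs[j] then aDigits cs (j + 1) else j
  else j
termination_by cs.length - j

-- cited by aLoop's decreasing_by
theorem aDigits_ge (cs : List Char) (j : Nat) : j ≤ aDigits cs j := by
  unfold aDigits
  split
  · split
    · exact Nat.le_trans (Nat.le_succ j) (aDigits_ge cs (j + 1))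
    · exact Nat.le_refl j
  · exact Nat.le_refl j
termination_by cs.length - j

-- outer while over index i with dict subs
def aLoop (cs : List Char) (subs : PySem.Dict Int String) (i : Nat) : PySem.Dict Int String :=
  if h : i < cs.length then
    if ("ACGT".toList.contains cs[i]) then
      let j := aDigits cs (i + 1)
      let subs' := if i + 1 < j then
          subs.insert (pyIntRun (PySem.List.slice cs (some ((i : Int) + 1)) (some (j : Int))))
            (String.singleton cs[i])
        else subs
      aLoop cs subs' j
    else aLoop cs subs (i + 1)
  else subs
termination_by cs.length - i
decreasing_by
  · have := aDigits_ge cs (i + 1); omega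
  · omega

def parse_tag (tag : String) : List (Int × String) :=
  (aLoop tag.toList PySem.Dict.empty 0).items

-- ===== PORT B =====
-- _record(subs, run, base): conditional insert (base is "" or a 1-char string)
def bRecord (subs : PySem.Dict Int String) (run : List Char) (base : String) :
    PySem.Dict Int String :=
  if run ≠ [] ∧ base ∈ (["A", "C", "G", "T"] : List String) then
    subs.insert (pyIntRun run) base
  else subs

-- the for-loop over the characters with state (subs, run, base); run (a Python str of
-- digits only ever appended to and fed to int()) is ported as List Char
def bGo (subs : PySem.Dict Int String) (run : List Char) (base : String) :
    List Char → PySem.Dict Int String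
  | [] => bRecord subs run base
  | c :: rest =>
      if PySem.Chars.isdigit c then bGo subs (run ++ [c]) base rest
      else bGo (bRecord subs run base) [] (String.singleton c) rest

def parse_tag_alt (tag : String) : List (Int × String) :=
  (bGo PySem.Dict.empty [] "" tag.toList).items

-- ===== PRECONDITION & SPEC =====
def Spec_parse_tag (tag : String) (out : List (Int × String)) : Prop := out = parse_tag_alt tag
instance (tag : String) (out : List (Int × String)) : Decidable (Spec_parse_tag tag out) := by unfold Spec_parse_tag; infer_instance

-- ===== CLAIM (what is proved, stated in full; the proofs are below) =====
def Claim_equal_parse_tag : Prop := ∀ (tag : String), Dom_parse_tag tag → Spec_parse_tag tag (parse_tag tag)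

-- ===== LEMMAS AND PROOFS =====

-- mediator: A's loop expressed structurally on the remaining character list
def aList (subs : PySem.Dict Int String) : List Char → PySem.Dict Int String
  | [] => subs
  | c :: rest =>
      if ("ACGT".toList.contains c) then
        let ds := rest.takeWhile PySem.Chars.isdigit
        aList (if ds ≠ [] then subs.insert (pyIntRun ds) (String.singleton c) else subs)
          (rest.dropWhile PySem.Chars.isdigit)
      else aList subs rest
termination_by l => l.length
decreasing_by
  · have := List.length_dropWhile_le PySem.Chars.isdigit rest; simp; omega
  · simp

theorem aList_nil (subs : PySem.Dict Int String) : aList subs [] = subs := by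
  rw [aList]

theorem aList_cons_pos (subs : PySem.Dict Int String) (c : Char) (rest : List Char)
    (h : ("ACGT".toList.contains c) = true) :
    aList subs (c :: rest) =
      aList (if rest.takeWhile PySem.Chars.isdigit ≠ [] then
          subs.insert (pyIntRun (rest.takeWhile PySem.Chars.isdigit)) (String.singleton c)
        else subs) (rest.dropWhile PySem.Chars.isdigit) := by
  rw [aList]; rw [if_pos h]

theorem aList_cons_neg (subs : PySem.Dict Int String) (c : Char) (rest : List Char)
    (h : ¬ ("ACGT".toList.contains c) = true) :
    aList subs (c :: rest) = aList subs rest := by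
  rw [aList]; rw [if_neg h]

theorem bRecord_nil_run (subs : PySem.Dict Int String) (base : String) :
    bRecord subs [] base = subs := by
  unfold bRecord; rw [if_neg]; intro h; exact h.1 rfl

theorem bRecord_empty_base (subs : PySem.Dict Int String) (run : List Char) :
    bRecord subs run "" = subs := by
  unfold bRecord; rw [if_neg]; intro h
  have := h.2
  simp only [List.mem_cons, List.not_mem_nil, or_false] at this
  rcases this with h' | h' | h' | h' <;> exact absurd (congrArg String.toList h') (by simp)

theorem singleton_mem_iff (c : Char) :
    (String.singleton c ∈ (["A", "C", "G", "T"] : List String))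
      ↔ ("ACGT".toList.contains c) = true := by
  constructor
  · intro h
    have : c ∈ (['A', 'C', 'G', 'T'] : List Char) := by
      simp only [List.mem_cons, List.not_mem_nil, or_false] at h
      rcases h with h | h | h | h <;>
        · have := congrArg String.toList h; simp at this; simp [this]
    simpa using this
  · intro h
    have : c ∈ (['A', 'C', 'G', 'T'] : List Char) := by simpa using h
    fin_cases this <;> decide

theorem bRecord_singleton_pos (subs : PySem.Dict Int String) (run : List Char) (c : Char)
    (h : ("ACGT".toList.contains c) = true) (hne : run ≠ []) :
    bRecord subs run (String.singleton c) = subs.insert (pyIntRun run) (String.singleton c) := by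
  unfold bRecord; rw [if_pos ⟨hne, (singleton_mem_iff c).mpr h⟩]

theorem bRecord_singleton_neg (subs : PySem.Dict Int String) (run : List Char) (c : Char)
    (h : ¬ ("ACGT".toList.contains c) = true) :
    bRecord subs run (String.singleton c) = subs := by
  unfold bRecord; rw [if_neg]; intro h'; exact h ((singleton_mem_iff c).mp h'.2)

theorem digit_not_acgt (c : Char) (h : PySem.Chars.isdigit c = true) :
    ("ACGT".toList.contains c) = false := by
  simp only [PySem.Chars.isdigit] at h
  have : c ∉ (['A', 'C', 'G', 'T'] : List Char) := by
    intro hc; fin_cases hc <;> simp_all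
  simpa using this

theorem take_len_takeWhile {α : Type} (p : α → Bool) (l : List α) :
    l.take (l.takeWhile p).length = l.takeWhile p := by
  induction l with
  | nil => rfl
  | cons a t ih =>
      by_cases h : p a = true
      · simp [h, ih]
      · simp [Bool.eq_false_iff.mpr h]

theorem drop_len_takeWhile {α : Type} (p : α → Bool) (l : List α) :
    l.drop (l.takeWhile p).length = l.dropWhile p := by
  induction l with
  | nil => rfl
  | cons a t ih =>
      by_cases h : p a = true
      · simp [h, ih]
      · simp [Bool.eq_false_iff.mpr h]

theorem head_dropWhile_false {α : Type} (p : α → Bool) :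
    ∀ (l : List α) {c : α} {t : List α}, l.dropWhile p = c :: t → p c = false := by
  intro l
  induction l with
  | nil => intro c t h; simp at h
  | cons a r ih =>
      intro c t h
      by_cases ha : p a = true
      · rw [List.dropWhile_cons_of_pos ha] at h; exact ih h
      · rw [List.dropWhile_cons_of_neg ha] at h
        cases h; exact Bool.eq_false_iff.mpr ha

theorem aDigits_eq (cs : List Char) (j : Nat) :
    aDigits cs j = j + ((cs.drop j).takeWhile PySem.Chars.isdigit).length := by
  unfold aDigits
  split
  · rename_i h
    have hd : cs.drop j = cs[j] :: cs.drop (j + 1) := List.drop_eq_getElem_cons h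
    split
    · rename_i hdig
      rw [aDigits_eq cs (j + 1), hd, List.takeWhile_cons_of_pos hdig]
      simp; omega
    · rename_i hdig
      rw [hd, List.takeWhile_cons_of_neg hdig]; simp
  · rename_i h
    have : cs.drop j = [] := List.drop_eq_nil_of_le (by omega)
    rw [this]; simp
termination_by cs.length - j

-- A's indexed loop computes aList on the remaining suffix
theorem aLoop_eq_aList (cs : List Char) :
    ∀ (n i : Nat) (subs : PySem.Dict Int String), cs.length - i ≤ n →
      aLoop cs subs i = aList subs (cs.drop i) := by
  intro n
  induction n with
  | zero =>
      intro i subs h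
      have hi : ¬ i < cs.length := by omega
      rw [aLoop]; simp only [hi, dite_false]
      rw [List.drop_eq_nil_of_le (by omega), aList_nil]
  | succ n ih =>
      intro i subs h
      by_cases hi : i < cs.length
      · have hd : cs.drop i = cs[i] :: cs.drop (i + 1) := List.drop_eq_getElem_cons hi
        rw [aLoop]
        simp only [hi, dite_true]
        by_cases hc : ("ACGT".toList.contains cs[i]) = true
        · rw [if_pos hc]
          have hj : aDigits cs (i + 1)
              = (i + 1) + ((cs.drop (i + 1)).takeWhile PySem.Chars.isdigit).length :=
            aDigits_eq cs (i + 1)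
          have hslice : PySem.List.slice cs (some ((i : Int) + 1)) (some ((aDigits cs (i + 1) : Nat) : Int))
              = (cs.drop (i + 1)).takeWhile PySem.Chars.isdigit := by
            rw [hj]
            have h1 : ((i : Int) + 1) = (((i + 1 : Nat) : Nat) : Int) := by push_cast; ring
            have h2 : (((i + 1) + ((cs.drop (i + 1)).takeWhile PySem.Chars.isdigit).length : Nat) : Int)
                = (((i + 1 : Nat) : Nat) : Int)
                  + ((((cs.drop (i + 1)).takeWhile PySem.Chars.isdigit).length : Nat) : Int) := by
              push_cast; ring
            rw [h1, h2, PySem.List.slice_natCast_add]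
            exact take_len_takeWhile _ _
          have hdropj : cs.drop (aDigits cs (i + 1))
              = (cs.drop (i + 1)).dropWhile PySem.Chars.isdigit := by
            rw [hj, ← List.drop_drop]
            exact drop_len_takeWhile _ _
          rw [ih (aDigits cs (i + 1)) _ (by omega), hd,
            aList_cons_pos _ _ _ hc, hdropj, hslice]
          congr 1
          have hlt : (i + 1 < aDigits cs (i + 1))
              ↔ ((cs.drop (i + 1)).takeWhile PySem.Chars.isdigit) ≠ [] := by
            rw [hj]
            constructor
            · intro h' he; rw [he] at h'; simp at h'
            · intro h'; have := List.length_pos_iff.mpr h'; omega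
          by_cases hne : ((cs.drop (i + 1)).takeWhile PySem.Chars.isdigit) ≠ []
          · rw [if_pos (hlt.mpr hne), if_pos hne]
          · rw [if_neg (fun h' => hne (hlt.mp h')), if_neg hne]
        · rw [if_neg hc, ih (i + 1) subs (by omega), hd, aList_cons_neg _ _ _ hc]
      · rw [aLoop]; simp only [hi, dite_false]
        rw [List.drop_eq_nil_of_le (by omega), aList_nil]

-- B consumes a block of digits by appending it to the run
theorem bGo_digits (ds : List Char) :
    ∀ (t : List Char) (subs : PySem.Dict Int String) (run : List Char) (base : String),
      (∀ c ∈ ds, PySem.Chars.isdigit c = true) →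
      bGo subs run base (ds ++ t) = bGo subs (run ++ ds) base t := by
  induction ds with
  | nil => intro t subs run base _; simp
  | cons c r ih =>
      intro t subs run base h
      have hc : PySem.Chars.isdigit c = true := h c (by simp)
      simp only [List.cons_append, bGo, hc, if_true]
      rw [ih t subs (run ++ [c]) base (fun x hx => h x (by simp [hx]))]
      simp

-- A skips a block of digits (digits are never in "ACGT")
theorem aList_digits (ds : List Char) :
    ∀ (t : List Char) (subs : PySem.Dict Int String),
      (∀ c ∈ ds, PySem.Chars.isdigit c = true) →
      aList subs (ds ++ t) = aList subs t := by
  induction ds with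
  | nil => intro t subs _; rfl
  | cons c r ih =>
      intro t subs h
      have hc : ¬ ("ACGT".toList.contains c) = true := by
        rw [digit_not_acgt c (h c (by simp))]; simp
      rw [List.cons_append, aList_cons_neg _ _ _ hc]
      exact ih t subs (fun x hx => h x (by simp [hx]))

-- main correspondence: at a run boundary (rest empty or starting with a non-digit),
-- B with pending state (run, base) agrees with A after flushing that state
theorem bGo_eq_aList :
    ∀ (n : Nat) (rest : List Char), rest.length ≤ n →
      (∀ c t, rest = c :: t → PySem.Chars.isdigit c = false) →
      ∀ (subs : PySem.Dict Int String) (run : List Char) (base : String),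
        bGo subs run base rest = aList (bRecord subs run base) rest := by
  intro n
  induction n with
  | zero =>
      intro rest h _ subs run base
      have : rest = [] := List.eq_nil_of_length_eq_zero (by omega)
      subst this
      show bRecord subs run base = aList (bRecord subs run base) []
      rw [aList_nil]
  | succ n ih =>
      intro rest hlen hhead subs run base
      cases rest with
      | nil =>
          show bRecord subs run base = aList (bRecord subs run base) []
          rw [aList_nil]
      | cons c t =>
          have hc : PySem.Chars.isdigit c = false := hhead c t rfl
          simp only [bGo, hc, Bool.false_eq_true, if_false]
          have hsplit : t.takeWhile PySem.Chars.isdigit ++ t.dropWhile PySem.Chars.isdigit = t :=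
            List.takeWhile_append_dropWhile
          have hdig : ∀ x ∈ t.takeWhile PySem.Chars.isdigit, PySem.Chars.isdigit x = true := by
            intro x hx; exact List.mem_takeWhile_imp hx
          have hhead' : ∀ c₂ t₂, t.dropWhile PySem.Chars.isdigit = c₂ :: t₂ →
              PySem.Chars.isdigit c₂ = false := by
            intro c₂ t₂ h₂; exact head_dropWhile_false _ t h₂
          have hlen' : (t.dropWhile PySem.Chars.isdigit).length ≤ n := by
            have := List.length_dropWhile_le PySem.Chars.isdigit t
            simp only [List.length_cons] at hlen; omega
          have hB : bGo (bRecord subs run base) [] (String.singleton c) t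
              = aList (bRecord (bRecord subs run base) (t.takeWhile PySem.Chars.isdigit)
                  (String.singleton c)) (t.dropWhile PySem.Chars.isdigit) := by
            conv_lhs => rw [← hsplit]
            rw [bGo_digits _ _ _ [] _ hdig]
            simp only [List.nil_append]
            exact ih _ hlen' hhead' _ _ (String.singleton c)
          rw [hB]
          by_cases hacgt : ("ACGT".toList.contains c) = true
          · rw [aList_cons_pos _ _ _ hacgt]
            congr 1
            by_cases hne : (t.takeWhile PySem.Chars.isdigit) ≠ []
            · rw [bRecord_singleton_pos _ _ _ hacgt hne, if_pos hne]
            · have : (t.takeWhile PySem.Chars.isdigit) = [] := not_not.mp hne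
              rw [if_neg hne, this, bRecord_nil_run]
          · rw [aList_cons_neg _ _ _ hacgt, bRecord_singleton_neg _ _ _ hacgt]
            conv_rhs => rw [← hsplit]
            rw [aList_digits _ _ _ hdig]

theorem bGo_start (cs : List Char) (subs : PySem.Dict Int String) :
    bGo subs [] "" cs = aList subs cs := by
  have hsplit : cs.takeWhile PySem.Chars.isdigit ++ cs.dropWhile PySem.Chars.isdigit = cs :=
    List.takeWhile_append_dropWhile
  have hdig : ∀ x ∈ cs.takeWhile PySem.Chars.isdigit, PySem.Chars.isdigit x = true := by
    intro x hx; exact List.mem_takeWhile_imp hx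
  have hhead : ∀ c₂ t₂, cs.dropWhile PySem.Chars.isdigit = c₂ :: t₂ →
      PySem.Chars.isdigit c₂ = false := by
    intro c₂ t₂ h₂; exact head_dropWhile_false _ cs h₂
  have h1 : bGo subs [] "" cs
      = bGo subs (cs.takeWhile PySem.Chars.isdigit) "" (cs.dropWhile PySem.Chars.isdigit) := by
    conv_lhs => rw [← hsplit]
    rw [bGo_digits _ _ _ [] _ hdig]; simp
  rw [h1, bGo_eq_aList _ _ (Nat.le_refl _) hhead, bRecord_empty_base]
  conv_rhs => rw [← hsplit]
  rw [aList_digits _ _ _ hdig]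

-- ===== VERDICT (by name: the statement is the Claim_ definition above) =====
theorem parse_tag_spec : Claim_equal_parse_tag := by
  intro tag _
  unfold Spec_parse_tag parse_tag parse_tag_alt
  rw [bGo_start, aLoop_eq_aList tag.toList tag.toList.length 0 PySem.Dict.empty (by omega)]
  rfl
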